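-- pv_equiv track=rewrite | github.com/vdavalap/FDA-Data-Bridges-Capstone-Project | dashboard.py | generate_followup_actions_answer
-- ===== SOURCE A (Python) =====
-- from typing import List, Dict, Optional
--
-- def generate_followup_actions_answer(detail_data: Dict, firm_name: str) -> str:
--     """Generate direct answer about follow-up actions from JSON data"""
--     follow_up = detail_data.get('follow_up_actions', {})
--     if not follow_up:
--         return f"**{firm_name}** has no follow-up actions specified in the inspection data."
--
--     answer = f"**Follow-Up Actions for {firm_name}:**\n\n"
--
--     # Immediate actions
--     immediate = follow_up.get('immediate', [])
--     if immediate: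
--         answer += f"**Immediate Actions (Within 15 Days):**\n"
--         for i, action in enumerate(immediate, 1):
--             answer += f"{i}. {action}\n"
--         answer += "\n"
--
--     # Short-term actions
--     short_term = follow_up.get('short_term', [])
--     if short_term:
--         answer += f"**Short-Term Actions (30-60 Days):**\n"
--         for i, action in enumerate(short_term, 1):
--             answer += f"{i}. {action}\n"
--         answer += "\n"
--
--     # Long-term actions
--     long_term = follow_up.get('long_term', [])
--     if long_term:
--         answer += f"**Long-Term Actions (6-12 Months):**\n"
--         for i, action in enumerate(long_term, 1):
--             answer += f"{i}. {action}\n"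
--         answer += "\n"
--
--     if not immediate and not short_term and not long_term:
--         answer = f"**{firm_name}** has no follow-up actions specified in the inspection data."
--
--     return answer
-- ===== SOURCE B (Python) =====
-- _SECTIONS = [
--     ("**Immediate Actions (Within 15 Days):**", "immediate"),
--     ("**Short-Term Actions (30-60 Days):**", "short_term"),
--     ("**Long-Term Actions (6-12 Months):**", "long_term"),
-- ]
--
--
-- def _render_lines(follow_up, sections):
--     """Recursively flatten the sections into a list of output lines (no newlines added)."""
--     if not sections:
--         return []
--     header, key = sections[0]
--     actions = follow_up.get(key, [])
--     block = [header] + [f"{n}. {a}" for n, a in enumerate(actions, 1)] + [""] if actions else []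
--     return block + _render_lines(follow_up, sections[1:])
--
--
-- def generate_followup_actions_answer(detail_data, firm_name: str) -> str:
--     """Generate direct answer about follow-up actions from JSON data (line-list + join)."""
--     follow_up = detail_data.get('follow_up_actions', {})
--     body = _render_lines(follow_up, _SECTIONS) if follow_up else []
--     if not body:
--         return f"**{firm_name}** has no follow-up actions specified in the inspection data."
--     return "\n".join([f"**Follow-Up Actions for {firm_name}:**", ""] + body) + "\n"
-- ===== Notes on version B (the rewrite author's own statement) =====
-- stated objective: alternative
-- what changed: Instead of A's three copy-pasted blocks each appending header/numbered/blank pieces onto a growing string, B recursively renders the sections into a flat list of bare output lines and produces the final string with a single newline-join, with the no-actions message as the empty-body fallback.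
import Mathlib
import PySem

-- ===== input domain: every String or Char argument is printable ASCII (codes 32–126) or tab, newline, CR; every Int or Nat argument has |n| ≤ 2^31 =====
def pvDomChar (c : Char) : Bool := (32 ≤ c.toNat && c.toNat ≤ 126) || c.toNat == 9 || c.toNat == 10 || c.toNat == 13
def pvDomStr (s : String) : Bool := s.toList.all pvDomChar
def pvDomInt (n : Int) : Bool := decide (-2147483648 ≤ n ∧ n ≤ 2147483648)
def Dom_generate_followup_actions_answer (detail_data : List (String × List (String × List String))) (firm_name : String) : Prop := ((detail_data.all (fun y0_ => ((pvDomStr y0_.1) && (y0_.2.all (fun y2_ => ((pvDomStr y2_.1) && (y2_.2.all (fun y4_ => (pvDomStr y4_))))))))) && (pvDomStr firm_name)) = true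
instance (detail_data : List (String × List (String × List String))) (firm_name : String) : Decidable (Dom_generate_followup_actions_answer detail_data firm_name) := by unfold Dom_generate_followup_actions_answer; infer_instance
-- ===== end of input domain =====

-- B builds a flat list of output lines with a recursive renderer and assembles the result with one "\n".join, instead of A's three copy-pasted string-accumulation blocks (simpler decomposition; same cost).


-- ===== PORT A =====
-- A's 'for i, action in enumerate(...): answer += f"{i}. {action}\n"' as a foldl over (answer, i)
def generate_followup_actions_answer (detail_data : List (String × List (String × List String))) (firm_name : String) : String :=
  let follow_up := PySem.Dict.getD (PySem.Dict.ofList detail_data) "follow_up_actions" []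
  if follow_up.isEmpty then
    "**" ++ firm_name ++ "** has no follow-up actions specified in the inspection data."
  else
    let answer := "**Follow-Up Actions for " ++ firm_name ++ ":**\n\n"
    let immediate := PySem.Dict.getD (PySem.Dict.ofList follow_up) "immediate" []
    let answer :=
      if !immediate.isEmpty then
        (immediate.foldl (fun (p : String × Int) action => (p.1 ++ PySem.Int.toStr p.2 ++ ". " ++ action ++ "\n", p.2 + 1))
          (answer ++ "**Immediate Actions (Within 15 Days):**\n", 1)).1 ++ "\n"
      else answer
    let short_term := PySem.Dict.getD (PySem.Dict.ofList follow_up) "short_term" []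
    let answer :=
      if !short_term.isEmpty then
        (short_term.foldl (fun (p : String × Int) action => (p.1 ++ PySem.Int.toStr p.2 ++ ". " ++ action ++ "\n", p.2 + 1))
          (answer ++ "**Short-Term Actions (30-60 Days):**\n", 1)).1 ++ "\n"
      else answer
    let long_term := PySem.Dict.getD (PySem.Dict.ofList follow_up) "long_term" []
    let answer :=
      if !long_term.isEmpty then
        (long_term.foldl (fun (p : String × Int) action => (p.1 ++ PySem.Int.toStr p.2 ++ ". " ++ action ++ "\n", p.2 + 1))
          (answer ++ "**Long-Term Actions (6-12 Months):**\n", 1)).1 ++ "\n"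
      else answer
    if immediate.isEmpty && short_term.isEmpty && long_term.isEmpty then
      "**" ++ firm_name ++ "** has no follow-up actions specified in the inspection data."
    else answer

-- ===== PORT B =====
-- B's '[f"{n}. {a}" for n, a in enumerate(actions, 1)]' (numbered lines, no newlines)
def pvNum : Int → List String → List String
  | _, [] => []
  | n, a :: t => (PySem.Int.toStr n ++ ". " ++ a) :: pvNum (n + 1) t

def pvSections : List (String × String) :=
  [("**Immediate Actions (Within 15 Days):**", "immediate"),
   ("**Short-Term Actions (30-60 Days):**", "short_term"),
   ("**Long-Term Actions (6-12 Months):**", "long_term")]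

-- B's recursive '_render_lines(follow_up, sections)'
def pvRenderLines (follow_up : List (String × List String)) : List (String × String) → List String
  | [] => []
  | (header, key) :: rest =>
    let actions := PySem.Dict.getD (PySem.Dict.ofList follow_up) key []
    (if !actions.isEmpty then header :: (pvNum 1 actions ++ [""]) else []) ++ pvRenderLines follow_up rest

def generate_followup_actions_answer_alt (detail_data : List (String × List (String × List String))) (firm_name : String) : String :=
  let follow_up := PySem.Dict.getD (PySem.Dict.ofList detail_data) "follow_up_actions" []
  let body := if !follow_up.isEmpty then pvRenderLines follow_up pvSections else []
  if body.isEmpty then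
    "**" ++ firm_name ++ "** has no follow-up actions specified in the inspection data."
  else
    PySem.Str.join "\n" (["**Follow-Up Actions for " ++ firm_name ++ ":**", ""] ++ body) ++ "\n"

-- ===== PRECONDITION & SPEC =====
def Spec_generate_followup_actions_answer (detail_data : List (String × List (String × List String))) (firm_name : String) (out : String) : Prop := out = generate_followup_actions_answer_alt detail_data firm_name
instance (detail_data : List (String × List (String × List String))) (firm_name : String) (out : String) : Decidable (Spec_generate_followup_actions_answer detail_data firm_name out) := by unfold Spec_generate_followup_actions_answer; infer_instance

-- ===== CLAIM (what is proved, stated in full; the proofs are below) =====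
def Claim_equal_generate_followup_actions_answer : Prop := ∀ (detail_data : List (String × List (String × List String))) (firm_name : String), Dom_generate_followup_actions_answer detail_data firm_name → Spec_generate_followup_actions_answer detail_data firm_name (generate_followup_actions_answer detail_data firm_name)

-- ===== LEMMAS AND PROOFS =====
-- the '\n'-terminated rendering of a list of lines (proof-only device linking the two shapes)
def pvStrOfLines : List String → String
  | [] => ""
  | l :: t => l ++ "\n" ++ pvStrOfLines t

theorem pvStrOfLines_append (xs ys : List String) :
    pvStrOfLines (xs ++ ys) = pvStrOfLines xs ++ pvStrOfLines ys := by
  induction xs with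
  | nil => simp [pvStrOfLines]
  | cons a t ih => simp [pvStrOfLines, ih, String.append_assoc]

-- "\n".join over a nonempty list, followed by "\n", newline-terminates every line
theorem pvJoin_newline (a : String) (L : List String) :
    PySem.Str.join "\n" (a :: L) ++ "\n" = a ++ "\n" ++ pvStrOfLines L := by
  induction L generalizing a with
  | nil =>
    apply String.toList_inj.mp
    simp [PySem.Str.join, PySem.Chars.join, pvStrOfLines, String.toList_append, List.intercalate]
  | cons b t ih =>
    have h : PySem.Str.join "\n" (a :: b :: t) = a ++ "\n" ++ PySem.Str.join "\n" (b :: t) := by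
      apply String.toList_inj.mp
      simp [PySem.Str.join, String.toList_append, PySem.Chars.join_cons_cons]
    rw [h, pvStrOfLines, String.append_assoc, String.append_assoc, ← ih b]
    simp [String.append_assoc]

-- A's enumerate-foldl produces the accumulator followed by the newline-terminated numbered lines
theorem pvFoldl_lines (actions : List String) (acc : String) (i : Int) :
    (actions.foldl (fun (p : String × Int) action => (p.1 ++ PySem.Int.toStr p.2 ++ ". " ++ action ++ "\n", p.2 + 1)) (acc, i)).1
      = acc ++ pvStrOfLines (pvNum i actions) := by
  induction actions generalizing acc i with
  | nil => simp [pvNum, pvStrOfLines]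
  | cons a t ih =>
    simp only [List.foldl_cons]
    rw [ih]
    simp [pvNum, pvStrOfLines, ← String.append_assoc]

theorem generate_followup_actions_answer_eq (detail_data : List (String × List (String × List String))) (firm_name : String) :
    generate_followup_actions_answer detail_data firm_name = generate_followup_actions_answer_alt detail_data firm_name := by
  unfold generate_followup_actions_answer generate_followup_actions_answer_alt
  set follow_up := PySem.Dict.getD (PySem.Dict.ofList detail_data) "follow_up_actions" [] with hfu
  by_cases h0 : follow_up.isEmpty
  · simp [h0]
  · simp only [h0, Bool.not_false, if_true, Bool.false_eq_true, if_false]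
    simp only [pvSections, pvRenderLines, pvFoldl_lines]
    by_cases h1 : (PySem.Dict.getD (PySem.Dict.ofList follow_up) "immediate" []).isEmpty <;>
    by_cases h2 : (PySem.Dict.getD (PySem.Dict.ofList follow_up) "short_term" []).isEmpty <;>
    by_cases h3 : (PySem.Dict.getD (PySem.Dict.ofList follow_up) "long_term" []).isEmpty <;>
      simp [h1, h2, h3, pvJoin_newline, pvStrOfLines_append, pvStrOfLines, ← String.append_assoc] <;>
      (apply String.toList_inj.mp; simp [String.toList_append])

-- ===== VERDICT (by name: the statement is the Claim_ definition above) =====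
theorem generate_followup_actions_answer_spec : Claim_equal_generate_followup_actions_answer := by
  intro dd fn _
  exact generate_followup_actions_answer_eq dd fn
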